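-- pv_equiv track=rewrite | github.com/inliver233/Ai-Novel-Editor | src/gui/editor/ghost_text_completion.py | _extract_current_word
-- ===== SOURCE A (Python) =====
-- def _extract_current_word(text: str) -> str:
--     """提取当前正在输入的单词"""
--     if not text:
--         return ""
--
--     # 从末尾开始查找单词边界
--     i = len(text) - 1
--     while i >= 0:
--         char = text[i]
--         if char.isalnum() or char in ['@', '_', '-']:
--             i -= 1
--         else:
--             break
--
--     return text[i + 1:]
-- ===== SOURCE B (Python) =====
-- def _extract_current_word(text: str) -> str:
--     """提取当前正在输入的单词"""
--     # Single forward pass: track the position just after the last non-word char.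
--     boundary = 0
--     for idx, ch in enumerate(text):
--         if not (ch.isalnum() or ch in ('@', '_', '-')):
--             boundary = idx + 1
--     return text[boundary:]
-- ===== Notes on version B (the rewrite author's own statement) =====
-- stated objective: alternative
-- what changed: Replaced A's backward early-exit index loop (per-index text[i] indexing) with a single forward enumerate pass maintaining the position after the last non-word character, then slicing from there.
import Mathlib
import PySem

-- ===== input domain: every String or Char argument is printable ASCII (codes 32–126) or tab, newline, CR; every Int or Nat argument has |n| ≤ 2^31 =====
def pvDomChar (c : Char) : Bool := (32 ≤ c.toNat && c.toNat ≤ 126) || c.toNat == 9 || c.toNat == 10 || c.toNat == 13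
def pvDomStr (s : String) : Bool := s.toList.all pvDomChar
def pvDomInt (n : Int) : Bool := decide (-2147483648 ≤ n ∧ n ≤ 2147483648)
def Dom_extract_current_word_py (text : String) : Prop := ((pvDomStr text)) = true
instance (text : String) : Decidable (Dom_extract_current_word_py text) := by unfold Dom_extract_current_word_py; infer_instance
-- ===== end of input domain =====

-- B replaces A's backward early-exit scan with a forward full pass tracking the last word boundary (objective: alternative).

-- ===== PORT A =====
-- char.isalnum() or char in ['@', '_', '-']
def pvWordChar (c : Char) : Bool :=
  PySem.Chars.isalnum c || (c == '@' || c == '_' || c == '-')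

-- A's while loop: i runs down from len-1 while text[i] is a word char; returns i+1
-- (the slice start; 0 when the loop ran past the front). Index is always in range,
-- so cs.getD i ' ' is exact for text[i].
def pvLoopA (cs : List Char) : Nat → Nat
  | 0 => if pvWordChar (cs.getD 0 ' ') then 0 else 1
  | i + 1 => if pvWordChar (cs.getD (i + 1) ' ') then pvLoopA cs i else i + 2

def extract_current_word_py (text : String) : String :=
  if text.toList.isEmpty then ""
  else String.ofList (text.toList.drop (pvLoopA text.toList (text.toList.length - 1)))  -- text[i+1:], i+1 ≥ 0

-- ===== PORT B =====
-- for idx, ch in enumerate(text): if not word-char: boundary = idx + 1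
def pvLoopB : List Char → Nat → Nat → Nat
  | [], _, boundary => boundary
  | c :: rest, idx, boundary =>
      pvLoopB rest (idx + 1) (if pvWordChar c then boundary else idx + 1)

def extract_current_word_py_alt (text : String) : String :=
  String.ofList (text.toList.drop (pvLoopB text.toList 0 0))  -- text[boundary:], boundary ≥ 0

-- ===== PRECONDITION & SPEC =====
def Spec_extract_current_word_py (text : String) (out : String) : Prop := out = extract_current_word_py_alt text
instance (text : String) (out : String) : Decidable (Spec_extract_current_word_py text out) := by unfold Spec_extract_current_word_py; infer_instance

-- ===== CLAIM (what is proved, stated in full; the proofs are below) =====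
def Claim_equal_extract_current_word_py : Prop := ∀ (text : String), Dom_extract_current_word_py text → Spec_extract_current_word_py text (extract_current_word_py text)

-- ===== LEMMAS AND PROOFS =====

theorem pvLoopB_append (cs : List Char) (c : Char) (idx b : Nat) :
    pvLoopB (cs ++ [c]) idx b =
      if pvWordChar c then pvLoopB cs idx b else idx + cs.length + 1 := by
  induction cs generalizing idx b with
  | nil => simp [pvLoopB]
  | cons d rest ih =>
      simp only [List.cons_append, pvLoopB, ih, List.length_cons]
      split_ifs <;> omega

theorem pvLoopA_append (cs : List Char) (c : Char) (i : Nat) (h : i < cs.length) :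
    pvLoopA (cs ++ [c]) i = pvLoopA cs i := by
  induction i with
  | zero =>
      have hg : (cs ++ [c]).getD 0 ' ' = cs.getD 0 ' ' := by
        simp only [List.getD, List.getElem?_append_left h]
      simp only [pvLoopA, hg]
  | succ i ih =>
      have hg : (cs ++ [c]).getD (i + 1) ' ' = cs.getD (i + 1) ' ' := by
        simp only [List.getD, List.getElem?_append_left h]
      simp only [pvLoopA, hg]
      split_ifs with hw
      · exact ih (by omega)
      · rfl

theorem pvLoop_eq (cs : List Char) (h : cs ≠ []) :
    pvLoopA cs (cs.length - 1) = pvLoopB cs 0 0 := by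
  induction cs using List.reverseRecOn with
  | nil => exact absurd rfl h
  | append_singleton cs c ih =>
      rw [pvLoopB_append]
      rcases cs.eq_nil_or_concat with rfl | ⟨cs', c', rfl⟩
      · simp [pvLoopA, pvLoopB]
      · simp only [List.concat_eq_append] at ih ⊢
        have hlen : (cs' ++ [c'] ++ [c]).length - 1 = (cs' ++ [c']).length - 1 + 1 := by
          simp
        have hg : (cs' ++ [c'] ++ [c]).getD ((cs' ++ [c']).length - 1 + 1) ' ' = c := by
          simp [List.getD]
        rw [hlen, pvLoopA, hg]
        split_ifs with hw
        · rw [pvLoopA_append _ _ _ (by simp)]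
          exact ih (by simp)
        · simp

-- ===== VERDICT (by name: the statement is the Claim_ definition above) =====
theorem extract_current_word_py_spec : Claim_equal_extract_current_word_py := by
  intro text _
  unfold Spec_extract_current_word_py extract_current_word_py extract_current_word_py_alt
  by_cases h : text.toList = []
  · simp [h, pvLoopB]
  · rw [pvLoop_eq _ h]
    simp [h]
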